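-- pv_equiv track=rewrite | github.com/noah-lichtenberg/probabilistic-zero-forcing | rzf_core.py | path_binary_states
-- ===== SOURCE A (Python) =====
-- def path_binary_states(n: int) -> list[int]:
--     results = []
--     center = n // 2 if n % 2 == 1 else n // 2 - 1
--     for i in range(n):
--         for j in range(i, n):
--             if i <= center <= j:
--                 s = ["0"] * n
--                 for k in range(i, j + 1):
--                     s[k] = "1"
--                 results.append("".join(s))
--     results.sort()
--     return [int(x, 2) for x in results]
-- ===== SOURCE B (Python) =====
-- def path_binary_states(n: int) -> list[int]:
--     # Each interval [i, j] with i <= center <= j contributes the integer whose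
--     # binary digits (width n) are 1 exactly on positions i..j, i.e.
--     # 2**(n-i) - 2**(n-1-j).  Compute those integers directly and sort them.
--     center = n // 2 if n % 2 == 1 else n // 2 - 1
--     vals = [(1 << (n - i)) - (1 << (n - 1 - j))
--             for i in range(center + 1)
--             for j in range(center, n)]
--     vals.sort()
--     return vals
-- ===== Notes on version B (the rewrite author's own statement) =====
-- stated objective: faster
-- what changed: B replaces building, sorting and base-2-parsing O(n^2) binary strings of length n with a direct closed-form integer 2**(n-i) - 2**(n-1-j) per interval, then sorts the integers.
import Mathlib
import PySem

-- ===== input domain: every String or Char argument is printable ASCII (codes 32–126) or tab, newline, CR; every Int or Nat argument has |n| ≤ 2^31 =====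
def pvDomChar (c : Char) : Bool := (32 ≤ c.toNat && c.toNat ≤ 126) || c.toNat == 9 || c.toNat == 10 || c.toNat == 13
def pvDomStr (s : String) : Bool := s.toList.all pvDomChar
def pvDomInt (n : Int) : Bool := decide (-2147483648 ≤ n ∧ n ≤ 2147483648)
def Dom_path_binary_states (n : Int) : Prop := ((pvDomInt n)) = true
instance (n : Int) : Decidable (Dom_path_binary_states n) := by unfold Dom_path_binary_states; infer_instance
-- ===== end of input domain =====

-- B replaces A's build/sort/parse of length-n binary strings by the closed-form integer
-- 2^(n-i) - 2^(n-1-j) per interval, sorted as integers (objective: faster).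

-- ===== PORT A =====
-- hand-port of int(x, 2): PySem.Int.ofStrBase? is the owning primitive, but its digit loop is a
-- private definition proofs cannot cite, so the conversion is transliterated as the base-2 digit
-- fold; exact on the nonempty '0'/'1'-digit strings A feeds it (the only calls A makes).
def pbsInt2 (x : String) : Int :=
  x.toList.foldl (fun acc c => 2 * acc + (if c = '1' then 1 else 0)) 0

def path_binary_states (n : Int) : List Int :=
  let center : Int := if PySem.Int.mod n 2 = 1 then PySem.Int.floordiv n 2 else PySem.Int.floordiv n 2 - 1
  let results : List String :=
    (PySem.List.pyRange 0 n 1).foldl (fun results i =>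
      (PySem.List.pyRange i n 1).foldl (fun results j =>
        if i ≤ center ∧ center ≤ j then
          let s0 : List String := List.replicate n.toNat "0"   -- ["0"] * n
          let s := (PySem.List.pyRange i (j + 1) 1).foldl (fun s k => PySem.List.pySetD s k "1") s0
          results ++ [PySem.Str.join "" s]
        else results) results) []
  (PySem.List.sorted results (fun x => x) false).map pbsInt2

-- ===== PORT B =====
-- 1 << k is Int shiftLeft; the shift amounts n-i and n-1-j are ≥ 0 for every i, j the ranges
-- produce, so .toNat is exact.
def path_binary_states_alt (n : Int) : List Int :=
  let center : Int := if PySem.Int.mod n 2 = 1 then PySem.Int.floordiv n 2 else PySem.Int.floordiv n 2 - 1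
  let vals : List Int :=
    (PySem.List.pyRange 0 (center + 1) 1).flatMap (fun i =>
      (PySem.List.pyRange center n 1).map (fun j =>
        ((1:Int) <<< (n - i).toNat) - ((1:Int) <<< (n - 1 - j).toNat)))
  PySem.List.sorted vals (fun x => x) false

-- ===== PRECONDITION & SPEC =====
def Spec_path_binary_states (n : Int) (out : List Int) : Prop := out = path_binary_states_alt n
instance (n : Int) (out : List Int) : Decidable (Spec_path_binary_states n out) := by unfold Spec_path_binary_states; infer_instance

-- ===== CLAIM (what is proved, stated in full; the proofs are below) =====
def Claim_equal_path_binary_states : Prop := ∀ (n : Int), Dom_path_binary_states n → Spec_path_binary_states n (path_binary_states n)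

-- ===== LEMMAS AND PROOFS =====

-- the character list of the interval state [i, j]: i zeros, j+1-i ones, n-1-j zeros
def pbsChars (n i j : Int) : List Char :=
  List.replicate i.toNat '0' ++ List.replicate (j + 1 - i).toNat '1' ++ List.replicate (n - 1 - j).toNat '0'

def pbsStr (n i j : Int) : String := String.ofList (pbsChars n i j)

def pbsVal (n i j : Int) : Int := 2 ^ (n - i).toNat - 2 ^ (n - 1 - j).toNat

def pbsAscS (n c : Int) : List String :=
  (PySem.List.pyRange 0 (c + 1) 1).flatMap (fun i =>
    (PySem.List.pyRange c n 1).map (fun j => pbsStr n i j))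

def pbsDescS (n c : Int) : List String :=
  (PySem.List.pyRange 0 (c + 1) 1).reverse.flatMap (fun i =>
    (PySem.List.pyRange c n 1).map (fun j => pbsStr n i j))

def pbsAscV (n c : Int) : List Int :=
  (PySem.List.pyRange 0 (c + 1) 1).flatMap (fun i =>
    (PySem.List.pyRange c n 1).map (fun j => pbsVal n i j))

def pbsDescV (n c : Int) : List Int :=
  (PySem.List.pyRange 0 (c + 1) 1).reverse.flatMap (fun i =>
    (PySem.List.pyRange c n 1).map (fun j => pbsVal n i j))

-- the inner "for k in range(i, j+1): s[k] = '1'" loop, characterised elementwise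
lemma pbs_setRange (a b : Int) (s : List String) (ha : 0 ≤ a) (hb : b ≤ (s.length : Int)) :
    ∀ m : Nat, ((PySem.List.pyRange a b 1).foldl (fun s k => PySem.List.pySetD s k "1") s)[m]? =
      if a ≤ (m : Int) ∧ (m : Int) < b then some "1" else s[m]? := by
  have hkey : ∀ t : Nat, ∀ a : Int, ∀ s : List String, 0 ≤ a → b ≤ (s.length : Int) → (b - a).toNat = t →
      ∀ m : Nat, ((PySem.List.pyRange a b 1).foldl (fun s k => PySem.List.pySetD s k "1") s)[m]? =
        if a ≤ (m : Int) ∧ (m : Int) < b then some "1" else s[m]? := by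
    intro t
    induction t with
    | zero =>
      intro a s ha hb ht m
      rw [PySem.List.pyRange_one_eq_nil (by omega)]
      simp only [List.foldl_nil]
      rw [if_neg (by omega)]
    | succ t ih =>
      intro a s ha hb ht m
      rw [PySem.List.pyRange_one_cons (by omega)]
      simp only [List.foldl_cons]
      rw [PySem.List.pySetD_of_nonneg s "1" ha]
      rw [ih (a + 1) (s.set a.toNat "1") (by omega) (by simp; omega) (by omega) m]
      rw [List.getElem?_set]
      split_ifs <;> first | rfl | omega
  exact hkey (b - a).toNat a s ha hb rfl

lemma pbs_chars_get? (n i j : Int) (h0 : 0 ≤ i) (hij : i ≤ j) (hj : j < n) (m : Nat) :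
    (pbsChars n i j)[m]? =
      if (m : Int) < n then some (if i ≤ (m : Int) ∧ (m : Int) ≤ j then '1' else '0') else none := by
  unfold pbsChars
  rw [List.getElem?_append, List.getElem?_append, List.getElem?_replicate,
      List.getElem?_replicate, List.getElem?_replicate]
  simp only [List.length_append, List.length_replicate]
  split_ifs <;> first | rfl | omega

lemma pbs_inner_join (n i j : Int) (h0 : 0 ≤ i) (hij : i ≤ j) (hj : j < n) :
    PySem.Str.join ""
      ((PySem.List.pyRange i (j + 1) 1).foldl (fun s k => PySem.List.pySetD s k "1")
        (List.replicate n.toNat "0")) = pbsStr n i j := by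
  have hlist : ((PySem.List.pyRange i (j + 1) 1).foldl (fun s k => PySem.List.pySetD s k "1")
      (List.replicate n.toNat "0")) = (pbsChars n i j).map (fun ch => String.ofList [ch]) := by
    apply List.ext_getElem?
    intro m
    rw [pbs_setRange i (j + 1) _ h0 (by simp; omega) m]
    rw [List.getElem?_map, pbs_chars_get? n i j h0 hij hj m, List.getElem?_replicate]
    by_cases hm : (m : Int) < n
    · rw [if_pos hm]
      by_cases hin : i ≤ (m : Int) ∧ (m : Int) ≤ j
      · rw [if_pos (by omega), if_pos hin]; rfl
      · rw [if_neg (by omega), if_neg hin, if_pos (by omega)]; rfl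
    · rw [if_neg hm, if_neg (by omega), if_neg (by omega)]; rfl
  rw [hlist, pbsStr]
  have htl : (PySem.Str.join "" ((pbsChars n i j).map (fun ch => String.ofList [ch]))).toList
      = pbsChars n i j := by
    rw [PySem.Str.toList_join]
    simp only [List.map_map]
    have hc : (String.toList ∘ fun ch => String.ofList [ch]) = (fun c => [c]) := by
      funext c; simp
    rw [hc]
    simp only [String.toList_empty]
    exact PySem.Chars.join_nil_singletons _
  calc PySem.Str.join "" ((pbsChars n i j).map (fun ch => String.ofList [ch]))
      = String.ofList ((PySem.Str.join "" ((pbsChars n i j).map (fun ch => String.ofList [ch]))).toList) := String.ofList_toList.symm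
    _ = String.ofList (pbsChars n i j) := by rw [htl]

lemma pbs_filter (n c i : Int) (hi0 : 0 ≤ i) (hin : i < n) (hc1 : c ≤ n - 1) :
    (PySem.List.pyRange i n 1).filter (fun j => decide (i ≤ c) && decide (c ≤ j)) =
      if i ≤ c then PySem.List.pyRange c n 1 else [] := by
  by_cases hic : i ≤ c
  · rw [if_pos hic, PySem.List.pyRange_one_append i c n hic (by omega), List.filter_append]
    have h1 : (PySem.List.pyRange i c 1).filter (fun j => decide (i ≤ c) && decide (c ≤ j)) = [] := by
      rw [List.filter_eq_nil_iff]
      intro a ha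
      rw [PySem.List.mem_pyRange_one] at ha
      simp only [Bool.and_eq_true, decide_eq_true_eq]
      omega
    have h2 : (PySem.List.pyRange c n 1).filter (fun j => decide (i ≤ c) && decide (c ≤ j)) =
        PySem.List.pyRange c n 1 := by
      rw [List.filter_eq_self]
      intro a ha
      rw [PySem.List.mem_pyRange_one] at ha
      simp only [Bool.and_eq_true, decide_eq_true_eq]
      omega
    rw [h1, h2, List.nil_append]
  · rw [if_neg hic, List.filter_eq_nil_iff]
    intro a ha
    simp only [Bool.and_eq_true, decide_eq_true_eq]
    omega

-- A's loop nest produces exactly the ascending block list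
lemma pbs_A_results (n c : Int) (hn : 1 ≤ n) (hc0 : 0 ≤ c) (hc1 : c ≤ n - 1) :
    ((PySem.List.pyRange 0 n 1).foldl (fun results i =>
      (PySem.List.pyRange i n 1).foldl (fun results j =>
        if i ≤ c ∧ c ≤ j then
          results ++ [PySem.Str.join "" ((PySem.List.pyRange i (j + 1) 1).foldl
            (fun s k => PySem.List.pySetD s k "1") (List.replicate n.toNat "0"))]
        else results) results) []) = pbsAscS n c := by
  have houter : ((PySem.List.pyRange 0 n 1).foldl (fun results i =>
      (PySem.List.pyRange i n 1).foldl (fun results j =>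
        if i ≤ c ∧ c ≤ j then
          results ++ [PySem.Str.join "" ((PySem.List.pyRange i (j + 1) 1).foldl
            (fun s k => PySem.List.pySetD s k "1") (List.replicate n.toNat "0"))]
        else results) results) []) =
      ((PySem.List.pyRange 0 n 1).foldl (fun results i =>
        results ++ (if i ≤ c then (PySem.List.pyRange c n 1).map (fun j => pbsStr n i j) else [])) []) := by
    apply PySem.List.foldl_congr_mem
    intro acc i hi
    rw [PySem.List.mem_pyRange_one] at hi
    have hbool : ((PySem.List.pyRange i n 1).foldl (fun results j =>
        if i ≤ c ∧ c ≤ j then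
          results ++ [PySem.Str.join "" ((PySem.List.pyRange i (j + 1) 1).foldl
            (fun s k => PySem.List.pySetD s k "1") (List.replicate n.toNat "0"))]
        else results) acc) =
        ((PySem.List.pyRange i n 1).foldl (fun results j =>
          if (fun j => decide (i ≤ c) && decide (c ≤ j)) j = true then
            results ++ [(fun j => PySem.Str.join "" ((PySem.List.pyRange i (j + 1) 1).foldl
              (fun s k => PySem.List.pySetD s k "1") (List.replicate n.toNat "0"))) j]
          else results) acc) := by
      apply PySem.List.foldl_congr_mem
      intro acc' j hj
      simp only [Bool.and_eq_true, decide_eq_true_eq]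
    rw [hbool, PySem.List.foldl_append_if, pbs_filter n c i (by omega) (by omega) hc1]
    by_cases hic : i ≤ c
    · rw [if_pos hic, if_pos hic]
      congr 1
      apply List.map_congr_left
      intro j hj
      rw [PySem.List.mem_pyRange_one] at hj
      exact pbs_inner_join n i j (by omega) (by omega) (by omega)
    · rw [if_neg hic, if_neg hic, List.map_nil, List.append_nil]
  rw [houter, PySem.List.foldl_append_eq_flatMap, List.nil_append]
  rw [PySem.List.pyRange_one_append 0 (c + 1) n (by omega) (by omega), List.flatMap_append]
  have h1 : (PySem.List.pyRange 0 (c + 1) 1).flatMap (fun i =>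
      if i ≤ c then (PySem.List.pyRange c n 1).map (fun j => pbsStr n i j) else []) = pbsAscS n c := by
    unfold pbsAscS
    apply List.flatMap_congr
    intro a ha
    rw [PySem.List.mem_pyRange_one] at ha
    rw [if_pos (by omega)]
  have h2 : (PySem.List.pyRange (c + 1) n 1).flatMap (fun i =>
      if i ≤ c then (PySem.List.pyRange c n 1).map (fun j => pbsStr n i j) else []) = [] := by
    rw [List.flatMap_eq_nil_iff]
    intro a ha
    rw [PySem.List.mem_pyRange_one] at ha
    rw [if_neg (by omega)]
  rw [h1, h2, List.append_nil]

-- parse of the interval string is the closed-form value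
lemma pbs_fold_rep0 (k : Nat) (acc : Int) :
    (List.replicate k '0').foldl (fun acc c => 2 * acc + (if c = '1' then 1 else 0)) acc = acc * 2 ^ k := by
  induction k generalizing acc with
  | zero => simp
  | succ m ih => simp [List.replicate_succ, ih, pow_succ]; ring

lemma pbs_fold_rep1 (k : Nat) (acc : Int) :
    (List.replicate k '1').foldl (fun acc c => 2 * acc + (if c = '1' then 1 else 0)) acc = acc * 2 ^ k + (2 ^ k - 1) := by
  induction k generalizing acc with
  | zero => simp
  | succ m ih => simp [List.replicate_succ, ih, pow_succ]; ring

lemma pbs_parse (n i j : Int) (h0 : 0 ≤ i) (hij : i ≤ j) (hj : j < n) :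
    pbsInt2 (pbsStr n i j) = pbsVal n i j := by
  unfold pbsInt2 pbsStr pbsChars pbsVal
  rw [String.toList_ofList, List.foldl_append, List.foldl_append,
      pbs_fold_rep0, pbs_fold_rep1, pbs_fold_rep0]
  have e : (j + 1 - i).toNat + (n - 1 - j).toNat = (n - i).toNat := by omega
  rw [← e, pow_add]
  ring

-- strict string order between interval strings
lemma pbs_lex01 (p u v : List Char) : List.Lex (· < ·) (p ++ '0' :: u) (p ++ '1' :: v) :=
  List.Lex.append_left (· < ·) (List.Lex.rel (by decide)) p

lemma pbs_str_lt_of_chars_lex (n i j i' j' : Int)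
    (h : List.Lex (· < ·) (pbsChars n i j) (pbsChars n i' j')) :
    pbsStr n i j < pbsStr n i' j' := by
  rw [pbsStr, pbsStr, String.lt_iff_toList_lt, String.toList_ofList, String.toList_ofList]
  exact (List.lt_iff_lex_lt _ _).mpr h

lemma pbs_str_lt_same (n i j j' : Int) (h0 : 0 ≤ i) (hij : i ≤ j) (hjj : j < j') (hj' : j' < n) :
    pbsStr n i j < pbsStr n i j' := by
  apply pbs_str_lt_of_chars_lex
  have e1 : (n - 1 - j).toNat = (n - 2 - j).toNat + 1 := by omega
  have e2 : (j' + 1 - i).toNat = (j + 1 - i).toNat + ((j' - j - 1).toNat + 1) := by omega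
  have l : pbsChars n i j = (List.replicate i.toNat '0' ++ List.replicate (j + 1 - i).toNat '1') ++
      ('0' :: List.replicate (n - 2 - j).toNat '0') := by
    simp [pbsChars, e1, List.replicate_succ]
  have r : pbsChars n i j' = (List.replicate i.toNat '0' ++ List.replicate (j + 1 - i).toNat '1') ++
      ('1' :: (List.replicate (j' - j - 1).toNat '1' ++ List.replicate (n - 1 - j').toNat '0')) := by
    simp [pbsChars, e2, List.replicate_add, List.replicate_succ]
  rw [l, r]
  exact pbs_lex01 _ _ _

lemma pbs_str_lt_of_lt (n i j i' j' : Int) (h0 : 0 ≤ i') (hii : i' < i)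
    (hij : i ≤ j) (hij' : i' ≤ j') (hj : j < n) (hj' : j' < n) :
    pbsStr n i j < pbsStr n i' j' := by
  apply pbs_str_lt_of_chars_lex
  have e1 : i.toNat = i'.toNat + ((i - i' - 1).toNat + 1) := by omega
  have e2 : (j' + 1 - i').toNat = (j' - i').toNat + 1 := by omega
  have l : pbsChars n i j = List.replicate i'.toNat '0' ++
      ('0' :: (List.replicate (i - i' - 1).toNat '0' ++ List.replicate (j + 1 - i).toNat '1' ++
        List.replicate (n - 1 - j).toNat '0')) := by
    simp [pbsChars, e1, List.replicate_add, List.replicate_succ]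
  have r : pbsChars n i' j' = List.replicate i'.toNat '0' ++
      ('1' :: (List.replicate (j' - i').toNat '1' ++ List.replicate (n - 1 - j').toNat '0')) := by
    simp [pbsChars, e2, List.replicate_succ]
  rw [l, r]
  exact pbs_lex01 _ _ _

-- strict integer order between interval values, same comparisons
lemma pbs_val_lt_same (n i j j' : Int) (h0 : 0 ≤ i) (hij : i ≤ j) (hjj : j < j') (hj' : j' < n) :
    pbsVal n i j < pbsVal n i j' := by
  unfold pbsVal
  have h : (n - 1 - j').toNat < (n - 1 - j).toNat := by omega
  have := pow_lt_pow_right₀ (by norm_num : (1:Int) < 2) h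
  omega

lemma pbs_val_lt_of_lt (n i j i' j' : Int) (h0 : 0 ≤ i') (hii : i' < i)
    (hij : i ≤ j) (hij' : i' ≤ j') (hj : j < n) (hj' : j' < n) :
    pbsVal n i j < pbsVal n i' j' := by
  unfold pbsVal
  have e1 : (n - i').toNat = (n - 1 - i').toNat + 1 := by omega
  have l1 : (2:Int) ^ (n - 1 - j).toNat ≥ 1 := one_le_pow₀ (by norm_num)
  have l2 : (2:Int) ^ (n - i).toNat ≤ 2 ^ (n - 1 - i').toNat :=
    pow_le_pow_right₀ (by norm_num) (by omega)
  have l3 : (2:Int) ^ (n - 1 - j').toNat ≤ 2 ^ (n - 1 - i').toNat :=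
    pow_le_pow_right₀ (by norm_num) (by omega)
  have e2 : (2:Int) ^ (n - i').toNat = 2 ^ (n - 1 - i').toNat * 2 := by rw [e1, pow_succ]
  omega

-- sorted(blocks ascending in i) is the blocks in descending i: generic over the block entry
lemma pbs_sort_generic {α : Type} [LinearOrder α] (n c : Int) (hc0 : 0 ≤ c) (hc1 : c ≤ n - 1)
    (f : Int → Int → α)
    (hsame : ∀ i j j', 0 ≤ i → i ≤ c → c ≤ j → j < j' → j' < n → f i j < f i j')
    (hcross : ∀ i i' j j', 0 ≤ i' → i' < i → i ≤ c → c ≤ j → c ≤ j' → j < n → j' < n → f i j < f i' j') :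
    PySem.List.sorted ((PySem.List.pyRange 0 (c + 1) 1).flatMap (fun i => (PySem.List.pyRange c n 1).map (f i))) (fun x => x) false
      = (PySem.List.pyRange 0 (c + 1) 1).reverse.flatMap (fun i => (PySem.List.pyRange c n 1).map (f i)) := by
  apply PySem.List.sorted_eq_of_perm_of_pairwise_lt
  · exact List.Perm.flatMap_right _ (List.reverse_perm _)
  · rw [List.pairwise_flatMap]
    constructor
    · intro a ha
      rw [List.mem_reverse, PySem.List.mem_pyRange_one] at ha
      rw [List.pairwise_map]
      refine (PySem.List.pairwise_lt_pyRange_one c n).imp_of_mem ?_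
      intro j j' hj hj' hlt
      rw [PySem.List.mem_pyRange_one] at hj hj'
      exact hsame a j j' (by omega) (by omega) (by omega) hlt (by omega)
    · rw [List.pairwise_reverse]
      refine (PySem.List.pairwise_lt_pyRange_one 0 (c + 1)).imp_of_mem ?_
      intro i' i hi' hi hlt x hx y hy
      rw [PySem.List.mem_pyRange_one] at hi hi'
      obtain ⟨j, hj, rfl⟩ := List.mem_map.1 hx
      obtain ⟨j', hj', rfl⟩ := List.mem_map.1 hy
      rw [PySem.List.mem_pyRange_one] at hj hj'
      exact hcross i i' j j' (by omega) hlt (by omega) (by omega) (by omega) (by omega) (by omega)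

lemma pbs_sortA (n c : Int) (hn : 1 ≤ n) (hc0 : 0 ≤ c) (hc1 : c ≤ n - 1) :
    PySem.List.sorted (pbsAscS n c) (fun x => x) false = pbsDescS n c := by
  unfold pbsAscS pbsDescS
  exact pbs_sort_generic n c hc0 hc1 (fun i j => pbsStr n i j)
    (fun i j j' h1 h2 h3 h4 h5 => pbs_str_lt_same n i j j' h1 (by omega) h4 h5)
    (fun i i' j j' h1 h2 h3 h4 h5 h6 h7 => pbs_str_lt_of_lt n i j i' j' h1 h2 (by omega) (by omega) h6 h7)

lemma pbs_sortB (n c : Int) (hn : 1 ≤ n) (hc0 : 0 ≤ c) (hc1 : c ≤ n - 1) :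
    PySem.List.sorted (pbsAscV n c) (fun x => x) false = pbsDescV n c := by
  unfold pbsAscV pbsDescV
  exact pbs_sort_generic n c hc0 hc1 (fun i j => pbsVal n i j)
    (fun i j j' h1 h2 h3 h4 h5 => pbs_val_lt_same n i j j' h1 (by omega) h4 h5)
    (fun i i' j j' h1 h2 h3 h4 h5 h6 h7 => pbs_val_lt_of_lt n i j i' j' h1 h2 (by omega) (by omega) h6 h7)

lemma pbs_map_parse (n c : Int) (hn : 1 ≤ n) (hc0 : 0 ≤ c) (hc1 : c ≤ n - 1) :
    (pbsDescS n c).map pbsInt2 = pbsDescV n c := by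
  unfold pbsDescS pbsDescV
  rw [List.map_flatMap]
  apply List.flatMap_congr
  intro i hi
  rw [List.mem_reverse, PySem.List.mem_pyRange_one] at hi
  rw [List.map_map]
  apply List.map_congr_left
  intro j hj
  rw [PySem.List.mem_pyRange_one] at hj
  exact pbs_parse n i j (by omega) (by omega) (by omega)

lemma pbs_B_vals (n c : Int) :
    ((PySem.List.pyRange 0 (c + 1) 1).flatMap (fun i =>
      (PySem.List.pyRange c n 1).map (fun j =>
        ((1:Int) <<< (n - i).toNat) - ((1:Int) <<< (n - 1 - j).toNat)))) = pbsAscV n c := by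
  simp [pbsAscV, pbsVal, Int.shiftLeft_eq]

-- ===== VERDICT (by name: the statement is the Claim_ definition above) =====
theorem path_binary_states_spec : Claim_equal_path_binary_states := by
  intro n _
  unfold Spec_path_binary_states
  simp only [path_binary_states, path_binary_states_alt]
  have hmod : PySem.Int.mod n 2 = n % 2 := PySem.Int.mod_eq_emod_of_pos (by omega)
  have hdiv : PySem.Int.floordiv n 2 = n / 2 := PySem.Int.floordiv_eq_ediv_of_pos (by omega)
  set c : Int := if PySem.Int.mod n 2 = 1 then PySem.Int.floordiv n 2 else PySem.Int.floordiv n 2 - 1 with hc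
  by_cases hn : 1 ≤ n
  · have hc0 : 0 ≤ c := by
      rw [hc]; split_ifs with h <;> rw [hdiv] <;> rw [hmod] at h <;> omega
    have hc1 : c ≤ n - 1 := by
      rw [hc]; split_ifs with h <;> rw [hdiv] <;> rw [hmod] at h <;> omega
    rw [pbs_A_results n c hn hc0 hc1, pbs_sortA n c hn hc0 hc1, pbs_map_parse n c hn hc0 hc1,
        pbs_B_vals n c, pbs_sortB n c hn hc0 hc1]
  · have hcneg : c + 1 ≤ 0 := by
      rw [hc]; split_ifs with h <;> rw [hdiv] <;> rw [hmod] at h <;> omega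
    rw [PySem.List.pyRange_one_eq_nil (by omega : n ≤ (0:Int)),
        PySem.List.pyRange_one_eq_nil (by omega : c + 1 ≤ (0:Int))]
    have e1 : PySem.List.sorted ([] : List String) (fun x => x) false = [] := by
      rw [PySem.List.sorted_eq_nil_iff]
    have e2 : PySem.List.sorted ([] : List Int) (fun x => x) false = [] := by
      rw [PySem.List.sorted_eq_nil_iff]
    simp [e1, e2]
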